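-- pv_equiv track=rewrite | github.com/prashant1507/test-intellect-ai | backend/ai_client.py | _inside_double_quotes
-- ===== SOURCE A (Python) =====
-- def _inside_double_quotes(text: str, idx: int) -> bool:
--     quoted = False
--     escaped = False
--     for ch in text[:idx]:
--         if escaped:
--             escaped = False
--             continue
--         if ch == "\\":
--             escaped = True
--             continue
--         if ch == '"':
--             quoted = not quoted
--     return quoted
-- ===== SOURCE B (Python) =====
-- import re
--
-- def _inside_double_quotes(text: str, idx: int) -> bool:
--     # strip every backslash-escaped pair, then check quote-count parity
--     cleaned = re.sub(r'\\.', '', text[:idx], flags=re.DOTALL)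
--     return cleaned.count('"') % 2 == 1
-- ===== Notes on version B (the rewrite author's own statement) =====
-- stated objective: idiomatic
-- what changed: Replaced the per-character quoted/escaped flag state machine with a transform-then-count pass: a regex removes every backslash-escaped pair from text[:idx] and the result is odd-parity of the remaining double quotes.
import Mathlib
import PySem

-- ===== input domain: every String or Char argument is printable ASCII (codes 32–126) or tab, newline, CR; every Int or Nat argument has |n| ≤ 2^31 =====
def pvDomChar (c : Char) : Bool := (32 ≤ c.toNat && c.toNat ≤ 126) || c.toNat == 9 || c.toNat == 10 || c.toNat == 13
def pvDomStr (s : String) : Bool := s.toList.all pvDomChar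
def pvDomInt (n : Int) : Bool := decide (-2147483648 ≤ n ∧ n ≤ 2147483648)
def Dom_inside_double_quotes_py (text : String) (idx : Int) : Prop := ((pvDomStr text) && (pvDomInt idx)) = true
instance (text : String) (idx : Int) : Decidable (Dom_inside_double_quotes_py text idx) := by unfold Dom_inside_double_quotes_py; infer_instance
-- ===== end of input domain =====

-- B replaces A's per-character quoted/escaped state machine with a strip-escaped-pairs pass
-- followed by a quote-count parity test (idiomatic transform-then-count; same cost).

-- ===== PORT A =====
-- one loop step of A: state is (quoted, escaped)
def pvStepA (s : Bool × Bool) (ch : Char) : Bool × Bool :=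
  if s.2 then (s.1, false)
  else if ch = '\\' then (s.1, true)
  else if ch = '"' then (!s.1, s.2)
  else s

def inside_double_quotes_py (text : String) (idx : Int) : Bool :=
  ((PySem.List.slice text.toList none (some idx)).foldl pvStepA (false, false)).1

-- ===== PORT B =====
-- hand port of re.sub(r'\\.', '', s, flags=re.DOTALL): leftmost non-overlapping removal of
-- backslash+any-char pairs; a lone trailing backslash is kept (exact for this regex)
def pvStripEsc : List Char → List Char
  | [] => []
  | c :: rest =>
    if c = '\\' then
      match rest with
      | [] => [c]
      | _ :: r => pvStripEsc r
    else c :: pvStripEsc rest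

def inside_double_quotes_py_alt (text : String) (idx : Int) : Bool :=
  ((pvStripEsc (PySem.List.slice text.toList none (some idx))).count '"') % 2 == 1

-- ===== PRECONDITION & SPEC =====
def Spec_inside_double_quotes_py (text : String) (idx : Int) (out : Bool) : Prop := out = inside_double_quotes_py_alt text idx
instance (text : String) (idx : Int) (out : Bool) : Decidable (Spec_inside_double_quotes_py text idx out) := by unfold Spec_inside_double_quotes_py; infer_instance

-- ===== CLAIM (what is proved, stated in full; the proofs are below) =====
def Claim_equal_inside_double_quotes_py : Prop := ∀ (text : String) (idx : Int), Dom_inside_double_quotes_py text idx → Spec_inside_double_quotes_py text idx (inside_double_quotes_py text idx)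

-- ===== LEMMAS AND PROOFS =====
theorem pvLoopKey (l : List Char) (q : Bool) :
    (l.foldl pvStepA (q, false)).1 = (q != (((pvStripEsc l).count '"') % 2 == 1)) := by
  induction l using pvStripEsc.induct generalizing q with
  | case1 => simp [pvStripEsc]
  | case2 =>
    simp [pvStripEsc, pvStepA]
  | case3 d r ih =>
    simp only [List.foldl, pvStepA]
    simpa [pvStripEsc, pvStepA] using ih q
  | case4 c rest hc ih =>
    have hs : pvStripEsc (c :: rest) = c :: pvStripEsc rest := by
      rw [pvStripEsc.eq_def]
      simp [hc]
    by_cases hq : c = '"'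
    · subst hq
      simp [List.foldl, pvStepA, hc, ih, hs]
      rcases Nat.mod_two_eq_zero_or_one (List.count '"' (pvStripEsc rest)) with h | h <;>
        cases q <;> simp [Nat.add_mod, h]
    · simp [List.foldl, pvStepA, hc, hq, ih, hs]

-- ===== VERDICT (by name: the statement is the Claim_ definition above) =====
theorem inside_double_quotes_py_spec : Claim_equal_inside_double_quotes_py := by
  intro text idx _
  unfold Spec_inside_double_quotes_py inside_double_quotes_py inside_double_quotes_py_alt
  rw [pvLoopKey]
  simp
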